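-- pv_equiv track=rewrite | github.com/bowen0701/alg-ds-python | alg_max_connected_colors.py | max_connected_colors
-- ===== SOURCE A (Python) =====
-- def _dfs_recur(r, c, grid, color, visited_d):
--     if r < 0 or r >= len(grid) or c < 0 or c >= len(grid[0]):
--         return 0
--
--     if color != grid[r][c] or visited_d.get((r, c)):
--         return 0
--
--     visited_d[(r, c)] = True
--     cc = 1
--
--     for r_neighbor in [r - 1, r + 1]:  # Up & down.
--         cc += _dfs_recur(r_neighbor, c, grid, color, visited_d)
--
--     for c_neighbor in [c - 1, c + 1]:  # Left & right.
--         cc += _dfs_recur(r, c_neighbor, grid, color, visited_d)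
--
--     return cc
--
-- def max_connected_colors(grid):
--     """Maximum number of connected colors.
--
--     Technique: DFS in a double for loops by return.
--
--     Time complexity: O(m * n).
--     Space complexity: O(m * n).
--     """
--     visited_d = {}
--     max_cc = 0
--
--     for r in range(len(grid)):
--         for c in range(len(grid[0])):
--             color = grid[r][c]
--             cc = _dfs_recur(r, c, grid, color, visited_d)
--             max_cc = max(cc, max_cc)
--
--     return max_cc
-- ===== SOURCE B (Python) =====
-- def max_connected_colors(grid):
--     """Maximum number of connected colors.
--
--     Iterative flood fill with an explicit stack instead of recursion.
--     """
--     visited = set()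
--     best = 0
--     rows = len(grid)
--     cols = len(grid[0]) if grid else 0
--     for r in range(rows):
--         for c in range(cols):
--             color = grid[r][c]
--             stack = [(r, c)]
--             count = 0
--             while stack:
--                 i, j = stack.pop()
--                 if (0 <= i < rows and 0 <= j < cols
--                         and grid[i][j] == color and (i, j) not in visited):
--                     visited.add((i, j))
--                     count += 1
--                     # pushed so that pop order is up, down, left, right
--                     stack.append((i, j + 1))
--                     stack.append((i, j - 1))
--                     stack.append((i + 1, j))
--                     stack.append((i - 1, j))
--             best = max(count, best)
--     return best
-- ===== Notes on version B (the rewrite author's own statement) =====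
-- stated objective: alternative
-- what changed: The recursive four-way DFS helper is replaced by an inline iterative flood fill with an explicit stack (pop, check bounds/color/visited, mark, push the four neighbours), keeping the same double loop over start cells and shared visited set.
import Mathlib
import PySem

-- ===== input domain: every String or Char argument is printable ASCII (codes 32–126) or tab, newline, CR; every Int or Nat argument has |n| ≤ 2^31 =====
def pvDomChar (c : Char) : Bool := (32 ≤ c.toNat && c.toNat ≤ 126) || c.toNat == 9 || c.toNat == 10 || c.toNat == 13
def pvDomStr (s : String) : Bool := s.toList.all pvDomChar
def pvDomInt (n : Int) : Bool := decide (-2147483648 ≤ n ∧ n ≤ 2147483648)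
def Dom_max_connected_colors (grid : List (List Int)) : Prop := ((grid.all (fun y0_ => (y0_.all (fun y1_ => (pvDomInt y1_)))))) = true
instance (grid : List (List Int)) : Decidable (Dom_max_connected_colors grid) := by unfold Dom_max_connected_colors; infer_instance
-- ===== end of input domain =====

-- B replaces A's recursive four-way DFS helper by an inline iterative flood fill with an
-- explicit stack (same double loop over start cells, same shared visited structure);
-- objective: alternative decomposition, same asymptotic cost.

-- number of rows, len(grid)
def pvRows (grid : List (List Int)) : Nat := grid.length
-- len(grid[0]) read totally (grid=[] gives 0; only used when this matches Python)
def pvCols (grid : List (List Int)) : Nat := (PySem.List.pyGetD grid 0 []).length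
-- grid[i][j]; under Pre_ every access the programs make is in range, so the default is never read
def pvCell (grid : List (List Int)) (i j : Int) : Int :=
  PySem.List.pyGetD (PySem.List.pyGetD grid i []) j 0

-- ===== PORT A =====
-- _dfs_recur, with a fuel parameter for termination; fuel 5*rows*cols+1 is proved
-- sufficient below (pvDfsA_fuel / pvMain), so the 0-fuel branch is never taken.
def pvDfsA (grid : List (List Int)) (color : Int) :
    Nat → Int → Int → PySem.Dict (Int × Int) Bool → Int × PySem.Dict (Int × Int) Bool
  | 0, _, _, v => (0, v)
  | f + 1, r, c, v =>
    if r < 0 ∨ (pvRows grid : Int) ≤ r ∨ c < 0 ∨ (pvCols grid : Int) ≤ c then (0, v)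
    else if color ≠ pvCell grid r c ∨ (v.get? (r, c)).getD false = true then (0, v)
    else
      let v1 := v.insert (r, c) true
      let o1 := pvDfsA grid color f (r - 1) c v1      -- up
      let o2 := pvDfsA grid color f (r + 1) c o1.2    -- down
      let o3 := pvDfsA grid color f r (c - 1) o2.2    -- left
      let o4 := pvDfsA grid color f r (c + 1) o3.2    -- right
      (1 + o1.1 + o2.1 + o3.1 + o4.1, o4.2)

def max_connected_colors (grid : List (List Int)) : Int :=
  let res := (PySem.List.pyRange 0 (pvRows grid) 1).foldl (fun st r =>
      (PySem.List.pyRange 0 (pvCols grid) 1).foldl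
        (fun (st : Int × PySem.Dict (Int × Int) Bool) c =>
          let color := pvCell grid r c
          let o := pvDfsA grid color (5 * pvRows grid * pvCols grid + 1) r c st.2
          (max o.1 st.1, o.2)) st)
    ((0 : Int), PySem.Dict.empty)
  res.1

-- ===== PORT B =====
-- cols = len(grid[0]) if grid else 0
def pvColsB (grid : List (List Int)) : Nat :=
  match grid with
  | [] => 0
  | row :: _ => row.length

-- the while-stack loop of B, with a fuel parameter for termination; fuel
-- 5*rows*cols+1 is proved sufficient below (pvMain), so the 0-fuel branch is never taken.
def pvFloodB (grid : List (List Int)) (color : Int) :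
    Nat → List (Int × Int) → PySem.Set (Int × Int) → Int → Int × PySem.Set (Int × Int)
  | _, [], s, cnt => (cnt, s)
  | 0, _, s, cnt => (cnt, s)
  | f + 1, (i, j) :: rest, s, cnt =>
    if 0 ≤ i ∧ i < (pvRows grid : Int) ∧ 0 ≤ j ∧ j < (pvColsB grid : Int) ∧
        pvCell grid i j = color ∧ ¬ (i, j) ∈ s then
      -- push so that pop order is up, down, left, right
      pvFloodB grid color f
        ((i - 1, j) :: (i + 1, j) :: (i, j - 1) :: (i, j + 1) :: rest)
        (PySem.Set.add s (i, j)) (cnt + 1)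
    else pvFloodB grid color f rest s cnt

def max_connected_colors_alt (grid : List (List Int)) : Int :=
  let res := (PySem.List.pyRange 0 (pvRows grid) 1).foldl (fun st r =>
      (PySem.List.pyRange 0 (pvColsB grid) 1).foldl
        (fun (st : Int × PySem.Set (Int × Int)) c =>
          let color := pvCell grid r c
          let o := pvFloodB grid color (5 * pvRows grid * pvColsB grid + 1) [(r, c)] st.2 0
          (max o.1 st.1, o.2)) st)
    ((0 : Int), PySem.Set.empty)
  res.1

-- ===== PRECONDITION & SPEC =====
-- Pre_ excludes exactly the ragged grids on which Python A raises IndexError: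
-- some row shorter than row 0, so grid[r][c] with c < len(grid[0]) is out of range.
def Pre_max_connected_colors (grid : List (List Int)) : Prop :=
  ∀ row ∈ grid, (grid.headD []).length ≤ row.length
instance (grid : List (List Int)) : Decidable (Pre_max_connected_colors grid) := by
  unfold Pre_max_connected_colors; infer_instance

def pvWitness_max_connected_colors : List (List Int) := [[1, 1, 2], [2, 1, 2], [2, 2, 1]]

def Spec_max_connected_colors (grid : List (List Int)) (out : Int) : Prop :=
  out = max_connected_colors_alt grid
instance (grid : List (List Int)) (out : Int) : Decidable (Spec_max_connected_colors grid out) := by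
  unfold Spec_max_connected_colors; infer_instance

-- ===== CLAIM (what is proved, stated in full; the proofs are below) =====
def Claim_equal_max_connected_colors : Prop :=
  ∀ (grid : List (List Int)), Dom_max_connected_colors grid →
    Pre_max_connected_colors grid →
    Spec_max_connected_colors grid (max_connected_colors grid)

-- ===== LEMMAS AND PROOFS =====

theorem pvColsB_eq (grid : List (List Int)) : pvColsB grid = pvCols grid := by
  cases grid <;> simp [pvColsB, pvCols, PySem.List.pyGetD_zero_cons] <;> rfl

-- all in-bounds cells, as a list
def pvCells (grid : List (List Int)) : List (Int × Int) :=
  (List.range (pvRows grid)).flatMap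
    (fun i => (List.range (pvCols grid)).map (fun j => ((i : Int), (j : Int))))

-- number of in-bounds cells not yet in s: the decreasing measure
def pvMu (grid : List (List Int)) (s : List (Int × Int)) : Nat :=
  (pvCells grid).countP (fun p => ! decide (p ∈ s))

-- every value stored in the visited dict is true
def pvInv (d : PySem.Dict (Int × Int) Bool) : Prop :=
  ∀ p b, d.get? p = some b → b = true

theorem pvInv_empty : pvInv (PySem.Dict.empty) := by
  intro p b h; simp [PySem.Dict.get?_empty] at h

theorem pvMem_iff (d : PySem.Dict (Int × Int) Bool) (hinv : pvInv d) (p : Int × Int) :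
    ((d.get? p).getD false = true) ↔ p ∈ d.keys := by
  cases h : d.get? p with
  | none =>
    simp only [Option.getD_none]
    constructor
    · intro hf; cases hf
    · intro hmem
      exact absurd hmem ((PySem.Dict.get?_eq_none_iff_not_mem_keys d p).mp h)
  | some b =>
    have hb := hinv p b h
    subst hb
    simp only [Option.getD_some]
    constructor
    · intro _
      exact PySem.Dict.mem_keys_of_mem_items d (PySem.Dict.mem_items_of_get?_eq_some d h)
    · intro _; trivial

theorem pvInv_insert (d : PySem.Dict (Int × Int) Bool) (hinv : pvInv d) (p : Int × Int) :
    pvInv (d.insert p true) := by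
  intro q b h
  rw [PySem.Dict.get?_insert] at h
  split at h
  · simpa using h
  · exact hinv q b h

theorem pvKeys_insert (d : PySem.Dict (Int × Int) Bool) (p : Int × Int) (hp : p ∉ d.keys) :
    (d.insert p true).keys = d.keys ++ [p] := by
  apply PySem.Dict.keys_insert_of_not_contains
  cases hc : d.contains p
  · rfl
  · exact absurd ((PySem.Dict.contains_iff_mem_keys d p).mp hc) hp

theorem pvCountP_lt {α : Type} (l : List α) (p q : α → Bool)
    (hmono : ∀ a ∈ l, p a = true → q a = true)
    (x : α) (hx : x ∈ l) (hq : q x = true) (hp : p x = false) :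
    l.countP p < l.countP q := by
  induction l with
  | nil => cases hx
  | cons a l ih =>
    rw [List.countP_cons, List.countP_cons]
    have hmono' : ∀ a ∈ l, p a = true → q a = true :=
      fun a ha => hmono a (List.mem_cons_of_mem _ ha)
    rcases List.mem_cons.mp hx with hx | hx
    · subst hx
      have hle : l.countP p ≤ l.countP q := List.countP_mono_left hmono'
      have h0 : (if false = true then 1 else 0) = 0 := by simp
      have h1 : (if true = true then 1 else 0) = 1 := by simp
      rw [hp, hq, h0, h1]
      omega
    · have h1 := ih hmono' hx
      have h2 : (if p a = true then 1 else 0) ≤ (if q a = true then 1 else 0) := by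
        by_cases hpa : p a = true
        · rw [if_pos hpa, if_pos (hmono a (List.mem_cons_self) hpa)]
        · rw [if_neg hpa]; split <;> omega
      omega

theorem pvMu_mono (grid : List (List Int)) (s t : List (Int × Int))
    (h : ∀ p, p ∈ s → p ∈ t) : pvMu grid t ≤ pvMu grid s := by
  apply List.countP_mono_left
  intro p _ hp
  simp only [Bool.not_eq_true', decide_eq_false_iff_not] at hp ⊢
  intro hmem; exact hp (h p hmem)

theorem pvMem_cells (grid : List (List Int)) (i j : Int)
    (h1 : 0 ≤ i) (h2 : i < (pvRows grid : Int)) (h3 : 0 ≤ j) (h4 : j < (pvCols grid : Int)) :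
    (i, j) ∈ pvCells grid := by
  simp [pvCells, List.mem_flatMap, List.mem_map, List.mem_range]
  exact ⟨⟨i.toNat, by omega, by omega⟩, ⟨j.toNat, by omega, by omega⟩⟩

theorem pvMu_strict (grid : List (List Int)) (s : List (Int × Int)) (p : Int × Int)
    (hc : p ∈ pvCells grid) (hs : p ∉ s) :
    pvMu grid (s ++ [p]) < pvMu grid s := by
  unfold pvMu
  apply pvCountP_lt _ _ _ ?mono p hc ?hq ?hp
  case mono =>
    intro a _ ha
    simp only [Bool.not_eq_true', decide_eq_false_iff_not, List.mem_append] at ha ⊢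
    intro hm; exact ha (Or.inl hm)
  case hq => simpa using hs
  case hp => simp

theorem pvLen_cells (grid : List (List Int)) :
    (pvCells grid).length = pvRows grid * pvCols grid := by
  simp [pvCells, List.length_flatMap, Function.comp]

theorem pvMu_le (grid : List (List Int)) (s : List (Int × Int)) :
    pvMu grid s ≤ pvRows grid * pvCols grid := by
  rw [← pvLen_cells]
  exact List.countP_le_length

-- dfsA preserves the invariant and only grows the visited keys
theorem pvDfsA_post (grid : List (List Int)) (color : Int) :
    ∀ (f : Nat) (r c : Int) (d : PySem.Dict (Int × Int) Bool), pvInv d →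
      pvInv (pvDfsA grid color f r c d).2 ∧
      ∀ p ∈ d.keys, p ∈ (pvDfsA grid color f r c d).2.keys := by
  intro f
  induction f with
  | zero => intro r c d hinv; exact ⟨hinv, fun p hp => hp⟩
  | succ f ih =>
    intro r c d hinv
    rw [pvDfsA]
    split
    · exact ⟨hinv, fun p hp => hp⟩
    · split
      · exact ⟨hinv, fun p hp => hp⟩
      · simp only
        have h1 := ih (r - 1) c (d.insert (r, c) true) (pvInv_insert d hinv (r, c))
        have h2 := ih (r + 1) c _ h1.1
        have h3 := ih r (c - 1) _ h2.1
        have h4 := ih r (c + 1) _ h3.1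
        refine ⟨h4.1, fun p hp => ?_⟩
        apply h4.2; apply h3.2; apply h2.2; apply h1.2
        rw [PySem.Dict.mem_keys_insert]; exact Or.inr hp

-- fuel irrelevance for dfsA once fuel exceeds the number of unvisited cells
theorem pvDfsA_fuel (grid : List (List Int)) (color : Int) :
    ∀ (n : Nat), ∀ (f g : Nat) (r c : Int) (d : PySem.Dict (Int × Int) Bool),
      pvInv d → pvMu grid d.keys ≤ n → n ≤ f → n ≤ g →
      pvDfsA grid color (f + 1) r c d = pvDfsA grid color (g + 1) r c d := by
  intro n
  induction n with
  | zero =>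
    intro f g r c d hinv hmu _ _
    rw [pvDfsA, pvDfsA]
    split
    · rfl
    · rename_i hbnd
      split
      · rfl
      · rename_i hcol
        exfalso
        push_neg at hbnd hcol
        have hmem : (r, c) ∉ d.keys := by
          rw [← pvMem_iff d hinv]; simp [hcol.2]
        have := pvMu_strict grid d.keys (r, c)
          (pvMem_cells grid r c hbnd.1 (by omega) hbnd.2.2.1 (by omega)) hmem
        omega
  | succ n ih =>
    intro f g r c d hinv hmu hf hg
    rw [pvDfsA, pvDfsA]
    split
    · rfl
    · rename_i hbnd
      split
      · rfl
      · rename_i hcol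
        simp only
        push_neg at hbnd hcol
        have hmem : (r, c) ∉ d.keys := by
          rw [← pvMem_iff d hinv]; simp [hcol.2]
        have hcell : (r, c) ∈ pvCells grid :=
          pvMem_cells grid r c hbnd.1 (by omega) hbnd.2.2.1 (by omega)
        have hkeys := pvKeys_insert d (r, c) hmem
        have hmu1 : pvMu grid (d.insert (r, c) true).keys ≤ n := by
          rw [hkeys]
          have := pvMu_strict grid d.keys (r, c) hcell hmem
          omega
        obtain ⟨f, rfl⟩ : ∃ f', f = f' + 1 := ⟨f - 1, by omega⟩
        obtain ⟨g, rfl⟩ : ∃ g', g = g' + 1 := ⟨g - 1, by omega⟩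
        have hinv1 := pvInv_insert d hinv (r, c)
        have e1 := ih f g (r - 1) c _ hinv1 hmu1 (by omega) (by omega)
        rw [e1]
        have p1 := pvDfsA_post grid color (g + 1) (r - 1) c _ hinv1
        have hmu2 : pvMu grid (pvDfsA grid color (g + 1) (r - 1) c _).2.keys ≤ n :=
          le_trans (pvMu_mono grid _ _ p1.2) hmu1
        have e2 := ih f g (r + 1) c _ p1.1 hmu2 (by omega) (by omega)
        rw [e2]
        have p2 := pvDfsA_post grid color (g + 1) (r + 1) c _ p1.1
        have hmu3 := le_trans (pvMu_mono grid _ _ p2.2) hmu2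
        have e3 := ih f g r (c - 1) _ p2.1 hmu3 (by omega) (by omega)
        rw [e3]
        have p3 := pvDfsA_post grid color (g + 1) r (c - 1) _ p2.1
        have hmu4 := le_trans (pvMu_mono grid _ _ p3.2) hmu3
        have e4 := ih f g r (c + 1) _ p3.1 hmu4 (by omega) (by omega)
        rw [e4]

-- A's dfs folded over a list of start cells (the reference semantics for the stack loop)
def pvRunA (grid : List (List Int)) (color : Int) (f : Nat) :
    List (Int × Int) → PySem.Dict (Int × Int) Bool → Int × PySem.Dict (Int × Int) Bool
  | [], d => (0, d)
  | p :: ps, d =>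
    let o := pvDfsA grid color f p.1 p.2 d
    let o' := pvRunA grid color f ps o.2
    (o.1 + o'.1, o'.2)

theorem pvRunA_fuel (grid : List (List Int)) (color : Int) (n : Nat) :
    ∀ (st : List (Int × Int)) (f g : Nat) (d : PySem.Dict (Int × Int) Bool),
      pvInv d → pvMu grid d.keys ≤ n → n ≤ f → n ≤ g →
      pvRunA grid color (f + 1) st d = pvRunA grid color (g + 1) st d := by
  intro st
  induction st with
  | nil => intro f g d _ _ _ _; rfl
  | cons p ps ih =>
    intro f g d hinv hmu hf hg
    rw [pvRunA, pvRunA]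
    have e := pvDfsA_fuel grid color n f g p.1 p.2 d hinv hmu hf hg
    rw [e]
    have hpost := pvDfsA_post grid color (g + 1) p.1 p.2 d hinv
    have := ih f g _ hpost.1 (le_trans (pvMu_mono grid _ _ hpost.2) hmu) hf hg
    rw [this]

-- the main bisimulation: the stack flood fill equals A's dfs folded over the stack
theorem pvMain (grid : List (List Int)) (color : Int) :
    ∀ (fB : Nat) (st : List (Int × Int)) (d : PySem.Dict (Int × Int) Bool) (cnt : Int) (n : Nat),
      pvInv d → pvMu grid d.keys ≤ n → 5 * n + st.length ≤ fB →
      pvFloodB grid color fB st d.keys cnt =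
        (cnt + (pvRunA grid color (n + 1) st d).1, (pvRunA grid color (n + 1) st d).2.keys) := by
  intro fB
  induction fB with
  | zero =>
    intro st d cnt n hinv hmu hfuel
    have : st = [] := by cases st <;> simp_all
    subst this
    simp [pvFloodB, pvRunA]
  | succ f ih =>
    intro st d cnt n hinv hmu hfuel
    cases st with
    | nil => simp [pvFloodB, pvRunA]
    | cons p ps =>
      obtain ⟨i, j⟩ := p
      rw [pvFloodB]
      by_cases hcond : 0 ≤ i ∧ i < (pvRows grid : Int) ∧ 0 ≤ j ∧ j < (pvColsB grid : Int) ∧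
          pvCell grid i j = color ∧ ¬ (i, j) ∈ d.keys
      · rw [if_pos hcond]
        obtain ⟨hc1, hc2, hc3, hc4, hc5, hc6⟩ := hcond
        rw [pvColsB_eq] at hc4
        -- A's dfs takes its marking branch
        have hcell : (i, j) ∈ pvCells grid := pvMem_cells grid i j hc1 hc2 hc3 hc4
        have hmu_pos : 1 ≤ pvMu grid d.keys := by
          have := pvMu_strict grid d.keys (i, j) hcell hc6
          omega
        obtain ⟨m, rfl⟩ : ∃ m, n = m + 1 := ⟨n - 1, by omega⟩
        have hkeys := pvKeys_insert d (i, j) hc6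
        have hinv1 := pvInv_insert d hinv (i, j)
        have hmu1 : pvMu grid (d.insert (i, j) true).keys ≤ m := by
          rw [hkeys]
          have := pvMu_strict grid d.keys (i, j) hcell hc6
          omega
        have hadd : PySem.Set.add d.keys (i, j) = (d.insert (i, j) true).keys := by
          rw [hkeys, PySem.Set.add_of_not_mem hc6]
        rw [hadd]
        have hih := ih ((i - 1, j) :: (i + 1, j) :: (i, j - 1) :: (i, j + 1) :: ps)
          (d.insert (i, j) true) (cnt + 1) m hinv1 hmu1 (by simp at hfuel ⊢; omega)
        rw [hih]
        -- unfold A's side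
        have hA : pvDfsA grid color (m + 1 + 1) i j d =
            (1 + (pvDfsA grid color (m + 1) (i - 1) j (d.insert (i, j) true)).1
               + (pvDfsA grid color (m + 1) (i + 1) j
                    (pvDfsA grid color (m + 1) (i - 1) j (d.insert (i, j) true)).2).1
               + (pvDfsA grid color (m + 1) i (j - 1)
                    (pvDfsA grid color (m + 1) (i + 1) j
                      (pvDfsA grid color (m + 1) (i - 1) j (d.insert (i, j) true)).2).2).1
               + (pvDfsA grid color (m + 1) i (j + 1)
                    (pvDfsA grid color (m + 1) i (j - 1)
                      (pvDfsA grid color (m + 1) (i + 1) j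
                        (pvDfsA grid color (m + 1) (i - 1) j (d.insert (i, j) true)).2).2).2).1,
             (pvDfsA grid color (m + 1) i (j + 1)
                (pvDfsA grid color (m + 1) i (j - 1)
                  (pvDfsA grid color (m + 1) (i + 1) j
                    (pvDfsA grid color (m + 1) (i - 1) j (d.insert (i, j) true)).2).2).2).2) := by
          rw [pvDfsA]
          rw [if_neg (by push_neg; omega)]
          rw [if_neg (by
            push_neg
            exact ⟨hc5.symm, fun h => hc6 ((pvMem_iff d hinv (i, j)).mp h)⟩)]
        -- both sides now are runA computations; align fuels and associate
        simp only [pvRunA]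
        rw [hA]
        dsimp only
        -- the remaining ps-continuation fuels differ by one: use runA fuel irrelevance
        have p1 := pvDfsA_post grid color (m + 1) (i - 1) j _ hinv1
        have hmu2 := le_trans (pvMu_mono grid _ _ p1.2) hmu1
        have p2 := pvDfsA_post grid color (m + 1) (i + 1) j _ p1.1
        have hmu3 := le_trans (pvMu_mono grid _ _ p2.2) hmu2
        have p3 := pvDfsA_post grid color (m + 1) i (j - 1) _ p2.1
        have hmu4 := le_trans (pvMu_mono grid _ _ p3.2) hmu3
        have p4 := pvDfsA_post grid color (m + 1) i (j + 1) _ p3.1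
        have hmu5 := le_trans (pvMu_mono grid _ _ p4.2) hmu4
        have efuel := pvRunA_fuel grid color m ps m (m + 1) _ p4.1 hmu5 (le_refl m) (by omega)
        rw [efuel]
        rw [Prod.mk.injEq]
        exact ⟨by ring, rfl⟩
      · rw [if_neg hcond]
        -- A's dfs returns (0, d): one of the two guard conditions fires
        have hA : pvDfsA grid color (n + 1) i j d = (0, d) := by
          rw [pvDfsA]
          split
          · rfl
          · rename_i hbnd
            have hor : color ≠ pvCell grid i j ∨ (d.get? (i, j)).getD false = true := by
              push_neg at hbnd
              rw [pvColsB_eq] at hcond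
              by_cases hcol : color = pvCell grid i j
              · by_cases hmem : (i, j) ∈ d.keys
                · exact Or.inr ((pvMem_iff d hinv (i, j)).mpr hmem)
                · exact absurd ⟨hbnd.1, by omega, hbnd.2.2.1, by omega, hcol.symm, hmem⟩ hcond
              · exact Or.inl hcol
            rw [if_pos hor]
        have hih := ih ps d cnt n hinv hmu (by simp at hfuel ⊢; omega)
        rw [hih, pvRunA, hA]
        simp
  
-- one cell of the double loop: the per-cell step preserves the relation between states
def pvRel (grid : List (List Int)) (stA : Int × PySem.Dict (Int × Int) Bool)
    (stB : Int × PySem.Set (Int × Int)) : Prop :=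
  stA.1 = stB.1 ∧ stA.2.keys = stB.2 ∧ pvInv stA.2

theorem pvStep (grid : List (List Int)) (r c : Int) (stA : Int × PySem.Dict (Int × Int) Bool)
    (stB : Int × PySem.Set (Int × Int)) (hrel : pvRel grid stA stB) :
    pvRel grid
      (let color := pvCell grid r c
       let o := pvDfsA grid color (5 * pvRows grid * pvCols grid + 1) r c stA.2
       (max o.1 stA.1, o.2))
      (let color := pvCell grid r c
       let o := pvFloodB grid color (5 * pvRows grid * pvCols grid + 1) [(r, c)] stB.2 0
       (max o.1 stB.1, o.2)) := by
  obtain ⟨h1, h2, hinv⟩ := hrel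
  have hmu : pvMu grid stA.2.keys ≤ pvRows grid * pvCols grid := pvMu_le grid _
  rw [← h2]
  dsimp only
  have hmain := pvMain grid (pvCell grid r c) (5 * pvRows grid * pvCols grid + 1) [(r, c)]
    stA.2 0 (pvRows grid * pvCols grid) hinv hmu (by simp [mul_assoc])
  rw [hmain]
  have hrun : pvRunA grid (pvCell grid r c) (pvRows grid * pvCols grid + 1) [(r, c)] stA.2 =
      ((pvDfsA grid (pvCell grid r c) (pvRows grid * pvCols grid + 1) r c stA.2).1 + 0,
       (pvDfsA grid (pvCell grid r c) (pvRows grid * pvCols grid + 1) r c stA.2).2) := by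
    simp only [pvRunA]
  have hfuel : pvDfsA grid (pvCell grid r c) (pvRows grid * pvCols grid + 1) r c stA.2 =
      pvDfsA grid (pvCell grid r c) (5 * pvRows grid * pvCols grid + 1) r c stA.2 :=
    pvDfsA_fuel grid (pvCell grid r c) (pvRows grid * pvCols grid)
      (pvRows grid * pvCols grid) (5 * pvRows grid * pvCols grid) r c stA.2 hinv hmu
      (le_refl _) (by rw [mul_assoc]; exact Nat.le_mul_of_pos_left _ (by omega))
  rw [hrun, hfuel]
  refine ⟨?_, rfl, (pvDfsA_post grid (pvCell grid r c) _ r c stA.2 hinv).1⟩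
  simp [h1]

theorem pvFoldRel {σA σB : Type} (R : σA → σB → Prop) (l : List Int)
    (fA : σA → Int → σA) (fB : σB → Int → σB)
    (hstep : ∀ x sA sB, R sA sB → R (fA sA x) (fB sB x)) :
    ∀ sA sB, R sA sB → R (l.foldl fA sA) (l.foldl fB sB) := by
  induction l with
  | nil => intro sA sB h; exact h
  | cons x l ih => intro sA sB h; exact ih _ _ (hstep x sA sB h)

-- ===== VERDICT (by name: the statement is the Claim_ definition above) =====
theorem max_connected_colors_spec : Claim_equal_max_connected_colors := by
  intro grid _ _
  unfold Spec_max_connected_colors max_connected_colors max_connected_colors_alt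
  rw [pvColsB_eq]
  have hmain := pvFoldRel (pvRel grid) (PySem.List.pyRange 0 (pvRows grid) 1)
    (fun st r => (PySem.List.pyRange 0 (pvCols grid) 1).foldl
        (fun (st : Int × PySem.Dict (Int × Int) Bool) c =>
          let color := pvCell grid r c
          let o := pvDfsA grid color (5 * pvRows grid * pvCols grid + 1) r c st.2
          (max o.1 st.1, o.2)) st)
    (fun st r => (PySem.List.pyRange 0 (pvCols grid) 1).foldl
        (fun (st : Int × PySem.Set (Int × Int)) c =>
          let color := pvCell grid r c
          let o := pvFloodB grid color (5 * pvRows grid * pvCols grid + 1) [(r, c)] st.2 0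
          (max o.1 st.1, o.2)) st)
    (fun r sA sB hR => pvFoldRel (pvRel grid) _ _ _
      (fun c sA sB hR => pvStep grid r c sA sB hR) sA sB hR)
    ((0 : Int), PySem.Dict.empty) ((0 : Int), PySem.Set.empty)
    ⟨rfl, rfl, pvInv_empty⟩
  have h := hmain.1
  dsimp only at h ⊢
  exact h
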